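-- pv_equiv track=rewrite | github.com/Lippeck/FuckingAroundAndFindingOut | solver.py | find_best_positions
-- ===== SOURCE A (Python) =====
-- def find_best_positions(room_size, object_size):
--     room_x, room_y = room_size
--     orientations = [object_size, object_size[::-1]]  # Try both orientations
--
--     best_positions = []
--     max_objects = 0
--
--     for obj_x, obj_y in orientations:
--         positions = []
--         for x in range(0, room_x - obj_x - 1, obj_x + 1):
--             for y in range(0, room_y - obj_y - 1, obj_y + 1):
--                 positions.append((x, y))
--
--         if len(positions) > max_objects:
--             max_objects = len(positions)
--             best_positions = positions
--
--     return best_positions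
-- ===== SOURCE B (Python) =====
-- def find_best_positions(room_size, object_size):
--     room_x, room_y = room_size
--
--     def count(ox, oy):
--         # len(range(...)) is O(1): count positions without building them
--         nx = len(range(0, room_x - ox - 1, ox + 1))
--         if nx == 0:
--             return 0
--         return nx * len(range(0, room_y - oy - 1, oy + 1))
--
--     best = None
--     max_objects = 0
--     for o in (object_size, object_size[::-1]):
--         c = count(o[0], o[1])
--         if c > max_objects:
--             max_objects = c
--             best = o
--
--     if best is None:
--         return []
--     ox, oy = best
--     return [(x, y)
--             for x in range(0, room_x - ox - 1, ox + 1)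
--             for y in range(0, room_y - oy - 1, oy + 1)]
-- ===== Notes on version B (the rewrite author's own statement) =====
-- stated objective: alternative
-- what changed: Count each orientation's positions via len(range(...)) without materializing either list, then build only the winning orientation's list once (A builds both lists and compares their lengths).
import Mathlib
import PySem

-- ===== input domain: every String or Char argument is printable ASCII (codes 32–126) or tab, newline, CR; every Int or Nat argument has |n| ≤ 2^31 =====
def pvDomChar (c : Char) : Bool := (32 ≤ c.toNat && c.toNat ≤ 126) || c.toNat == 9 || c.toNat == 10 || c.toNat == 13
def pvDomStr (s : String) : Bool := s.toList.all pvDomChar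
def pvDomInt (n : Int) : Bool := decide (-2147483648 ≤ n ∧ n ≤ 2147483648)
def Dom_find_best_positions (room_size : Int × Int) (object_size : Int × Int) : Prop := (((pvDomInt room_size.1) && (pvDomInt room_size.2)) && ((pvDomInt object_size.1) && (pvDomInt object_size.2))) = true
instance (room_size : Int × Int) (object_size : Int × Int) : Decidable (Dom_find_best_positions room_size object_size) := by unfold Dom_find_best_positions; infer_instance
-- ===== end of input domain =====

-- ===== PORT A =====
-- B counts each orientation's positions without building its list and materializes only the winner; A builds both lists.
-- Note: A mutates nothing; equivalence is about the return value.
def find_best_positions (room_size : Int × Int) (object_size : Int × Int) : List (Int × Int) :=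
  let room_x := room_size.1
  let room_y := room_size.2
  let orientations : List (Int × Int) := [object_size, (object_size.2, object_size.1)]
  let st := orientations.foldl
    (fun (st : List (Int × Int) × Int) o =>
      let obj_x := o.1
      let obj_y := o.2
      let positions :=
        (PySem.List.pyRange 0 (room_x - obj_x - 1) (obj_x + 1)).foldl
          (fun acc x =>
            (PySem.List.pyRange 0 (room_y - obj_y - 1) (obj_y + 1)).foldl
              (fun acc y => acc ++ [(x, y)]) acc)
          []
      if (positions.length : Int) > st.2 then (positions, (positions.length : Int)) else st)
    ([], (0 : Int))
  st.1

-- ===== PORT B =====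
-- count(ox, oy) from Source B: len of the x-range, and only if non-empty, times the len of the y-range
def pvCount (room_x room_y ox oy : Int) : Int :=
  let nx := (PySem.List.pyRange 0 (room_x - ox - 1) (ox + 1)).length
  if nx == 0 then 0
  else (nx : Int) * ((PySem.List.pyRange 0 (room_y - oy - 1) (oy + 1)).length : Int)

-- the final comprehension of Source B
def pvGrid (room_x room_y ox oy : Int) : List (Int × Int) :=
  (PySem.List.pyRange 0 (room_x - ox - 1) (ox + 1)).flatMap (fun x =>
    (PySem.List.pyRange 0 (room_y - oy - 1) (oy + 1)).map (fun y => (x, y)))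

def find_best_positions_alt (room_size : Int × Int) (object_size : Int × Int) : List (Int × Int) :=
  let room_x := room_size.1
  let room_y := room_size.2
  let st := [object_size, (object_size.2, object_size.1)].foldl
    (fun (st : Option (Int × Int) × Int) o =>
      let c := pvCount room_x room_y o.1 o.2
      if c > st.2 then (some o, c) else st)
    (none, (0 : Int))
  match st.1 with
  | none => []
  | some o => pvGrid room_x room_y o.1 o.2

-- ===== PRECONDITION & SPEC =====
-- Pre_ excludes exactly the inputs where Python A raises ValueError: an object dimension of -1 makes a range step 0.
def Pre_find_best_positions (room_size : Int × Int) (object_size : Int × Int) : Prop :=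
  object_size.1 ≠ -1 ∧ object_size.2 ≠ -1
instance (_room_size : Int × Int) (object_size : Int × Int) : Decidable (Pre_find_best_positions _room_size object_size) := by
  unfold Pre_find_best_positions; infer_instance
def pvWitness_find_best_positions : (Int × Int) × (Int × Int) := ((10, 8), (2, 1))

def Spec_find_best_positions (room_size : Int × Int) (object_size : Int × Int) (out : List (Int × Int)) : Prop := out = find_best_positions_alt room_size object_size
instance (room_size : Int × Int) (object_size : Int × Int) (out : List (Int × Int)) : Decidable (Spec_find_best_positions room_size object_size out) := by unfold Spec_find_best_positions; infer_instance

-- ===== CLAIM (what is proved, stated in full; the proofs are below) =====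
def Claim_equal_find_best_positions : Prop := ∀ (room_size : Int × Int) (object_size : Int × Int), Dom_find_best_positions room_size object_size → Pre_find_best_positions room_size object_size → Spec_find_best_positions room_size object_size (find_best_positions room_size object_size)

-- ===== LEMMAS AND PROOFS =====

-- A's nested append-loop for one orientation builds exactly B's comprehension pvGrid
lemma posA_eq_grid (rx ry ox oy : Int) :
    (PySem.List.pyRange 0 (rx - ox - 1) (ox + 1)).foldl
      (fun acc x =>
        (PySem.List.pyRange 0 (ry - oy - 1) (oy + 1)).foldl
          (fun acc y => acc ++ [(x, y)]) acc)
      [] = pvGrid rx ry ox oy := by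
  have h : ∀ (acc : List (Int × Int)) (x : Int),
      (PySem.List.pyRange 0 (ry - oy - 1) (oy + 1)).foldl
        (fun acc y => acc ++ [(x, y)]) acc
      = acc ++ (PySem.List.pyRange 0 (ry - oy - 1) (oy + 1)).map (fun y => (x, y)) := by
    intro acc x
    exact PySem.List.foldl_append_singleton_eq_map _ _ _
  simp only [h]
  simpa using PySem.List.foldl_append_eq_flatMap
    (fun x => (PySem.List.pyRange 0 (ry - oy - 1) (oy + 1)).map (fun y => (x, y)))
    (PySem.List.pyRange 0 (rx - ox - 1) (ox + 1)) []

-- B's O(1) count equals the length of the list A builds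
lemma count_eq_length (rx ry ox oy : Int) :
    pvCount rx ry ox oy = ((pvGrid rx ry ox oy).length : Int) := by
  unfold pvCount pvGrid
  set xs := PySem.List.pyRange 0 (rx - ox - 1) (ox + 1)
  set ys := PySem.List.pyRange 0 (ry - oy - 1) (oy + 1)
  have hlen : (xs.flatMap (fun x => ys.map (fun y => (x, y)))).length = xs.length * ys.length := by
    simp [List.length_flatMap]
  rw [hlen]
  by_cases h : xs.length = 0 <;> simp [h]

theorem find_best_positions_spec_aux (room_size : Int × Int) (object_size : Int × Int) :
    find_best_positions room_size object_size = find_best_positions_alt room_size object_size := by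
  obtain ⟨rx, ry⟩ := room_size
  obtain ⟨ox, oy⟩ := object_size
  unfold find_best_positions find_best_positions_alt
  simp only [List.foldl_cons, List.foldl_nil, posA_eq_grid, count_eq_length]
  by_cases h1 : ((pvGrid rx ry ox oy).length : Int) > 0 <;>
    by_cases h2a : ((pvGrid rx ry oy ox).length : Int) > ((pvGrid rx ry ox oy).length : Int) <;>
    by_cases h2b : ((pvGrid rx ry oy ox).length : Int) > 0 <;>
    simp_all <;> try omega
  all_goals rw [if_neg (by omega), if_neg (by omega)]

-- ===== VERDICT (by name: the statement is the Claim_ definition above) =====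
theorem find_best_positions_spec : Claim_equal_find_best_positions := by
  intro rs os _ _
  exact find_best_positions_spec_aux rs os
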